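-- pv_equiv track=rewrite | github.com/jetstream5500/google_code_jam | 2018/qualification/A-Saving_The_Universe_Again/a.py | compute_damages
-- ===== SOURCE A (Python) =====
-- def compute_damages(program):
--     damage_list = []
--     total = 0
--     multiple = 1
--     for letter in program:
--         if letter == 'C':
--             multiple*=2
--             damage_list.append(0)
--         else:
--             total += multiple
--             damage_list.append(multiple)
--
--     return (total, damage_list)
-- ===== SOURCE B (Python) =====
-- def compute_damages(program):
--     # pass 1: number of 'C's preceding each position
--     counts = []
--     c = 0
--     for ch in program:
--         counts.append(c)
--         if ch == 'C':
--             c += 1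
--     # pass 2: closed-form damage per instruction
--     damage_list = [0 if ch == 'C' else 2 ** counts[i] for i, ch in enumerate(program)]
--     return (sum(damage_list), damage_list)
-- ===== Notes on version B (the rewrite author's own statement) =====
-- stated objective: alternative
-- what changed: Replaces the single loop threading a doubling multiplier with two passes: a prefix array of preceding 'C' counts, then a map using the closed-form power 2**count, with total as the sum of the damage list.
import Mathlib
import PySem

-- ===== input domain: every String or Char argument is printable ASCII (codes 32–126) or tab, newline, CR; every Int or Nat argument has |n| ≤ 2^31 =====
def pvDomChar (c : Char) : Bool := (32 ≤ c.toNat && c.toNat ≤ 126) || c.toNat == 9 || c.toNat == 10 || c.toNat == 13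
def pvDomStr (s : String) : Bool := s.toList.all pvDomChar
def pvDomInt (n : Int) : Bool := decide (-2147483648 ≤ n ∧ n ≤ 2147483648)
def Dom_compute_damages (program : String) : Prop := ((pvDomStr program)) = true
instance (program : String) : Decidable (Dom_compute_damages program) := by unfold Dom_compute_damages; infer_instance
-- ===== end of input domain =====

-- B replaces A's single multiplier-doubling loop by a prefix-count pass plus a closed-form
-- power map (objective: alternative decomposition, same cost).

-- ===== PORT A =====
-- one loop threading (damage_list, total, multiple)
def compute_damages (program : String) : Int × List Int :=
  let st := program.toList.foldl
    (fun (s : List Int × Int × Int) letter =>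
      if letter == 'C' then (s.1 ++ [0], s.2.1, s.2.2 * 2)
      else (s.1 ++ [s.2.2], s.2.1 + s.2.2, s.2.2))
    ([], 0, 1)
  (st.2.1, st.1)

-- ===== PORT B =====
-- pass 1: number of 'C's preceding each position
def pvPfxCounts : List Char → Nat → List Nat
  | [], _ => []
  | c :: cs, k => k :: pvPfxCounts cs (if c == 'C' then k + 1 else k)

def compute_damages_alt (program : String) : Int × List Int :=
  let counts := pvPfxCounts program.toList 0
  -- pass 2: closed-form damage per instruction
  let damage_list := List.zipWith
    (fun ch k => if ch == 'C' then (0 : Int) else 2 ^ k) program.toList counts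
  (damage_list.sum, damage_list)

-- ===== PRECONDITION & SPEC =====
def Spec_compute_damages (program : String) (out : Int × List Int) : Prop := out = compute_damages_alt program
instance (program : String) (out : Int × List Int) : Decidable (Spec_compute_damages program out) := by unfold Spec_compute_damages; infer_instance

-- ===== CLAIM (what is proved, stated in full; the proofs are below) =====
def Claim_equal_compute_damages : Prop := ∀ (program : String), Dom_compute_damages program → Spec_compute_damages program (compute_damages program)

-- ===== LEMMAS AND PROOFS =====

-- B's damage list for suffix cs with prefix count k
def pvDL (cs : List Char) (k : Nat) : List Int :=
  List.zipWith (fun ch k => if ch == 'C' then (0 : Int) else 2 ^ k) cs (pvPfxCounts cs k)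

theorem pvMain (cs : List Char) : ∀ (k : Nat) (dl : List Int) (t : Int),
    cs.foldl
      (fun (s : List Int × Int × Int) letter =>
        if letter == 'C' then (s.1 ++ [0], s.2.1, s.2.2 * 2)
        else (s.1 ++ [s.2.2], s.2.1 + s.2.2, s.2.2))
      (dl, t, (2 : Int) ^ k)
    = (dl ++ pvDL cs k, t + (pvDL cs k).sum, 2 ^ (k + cs.count 'C')) := by
  induction cs with
  | nil => intro k dl t; simp [pvDL, pvPfxCounts]
  | cons c cs ih =>
    intro k dl t
    by_cases h : c = 'C'
    · subst h
      simp only [List.foldl_cons, beq_self_eq_true, if_true]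
      have : (2 : Int) ^ k * 2 = 2 ^ (k + 1) := by ring
      rw [this, ih (k + 1)]
      simp [pvDL, pvPfxCounts]
      omega
    · have hb : (c == 'C') = false := by simp [h]
      simp only [List.foldl_cons, hb, if_false, Bool.false_eq_true]
      rw [ih k]
      simp [pvDL, pvPfxCounts, hb, h]
      ring

-- ===== VERDICT (by name: the statement is the Claim_ definition above) =====
theorem compute_damages_spec : Claim_equal_compute_damages := by
  intro program _
  unfold Spec_compute_damages compute_damages compute_damages_alt
  have h := pvMain program.toList 0 [] 0
  simp only [pow_zero] at h
  simp only [h, pvDL, List.nil_append, zero_add]
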